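-- pv_equiv track=rewrite | github.com/Khushigajjar/Advanced_Algorithm_And_Programming | Mutual_Friends_Detection.py | friend_suggestions
-- ===== SOURCE A (Python) =====
-- def friend_suggestions(user_id, user_set, all_friend_sets):
--     suggestions = set()
--     for friend in user_set:
--         friends_of_friend = all_friend_sets.get(friend, set())
--         for f in friends_of_friend:
--             if f not in user_set and f != user_id:
--                 suggestions.add(f)
--     return suggestions
-- ===== SOURCE B (Python) =====
-- def friend_suggestions(user_id, user_set, all_friend_sets):
--     # Divide and conquer: split the friend list in halves, per leaf take the looked-up
--     # friend set minus a once-precomputed exclusion set, and merge halves by set union.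
--     excluded = set(user_set) | {user_id}
--     friends = list(user_set)
--
--     def rec(lo, hi):
--         if hi - lo == 0:
--             return set()
--         if hi - lo == 1:
--             return set(all_friend_sets.get(friends[lo], set())) - excluded
--         mid = (lo + hi) // 2
--         return rec(lo, mid) | rec(mid, hi)
--
--     return rec(0, len(friends))
-- ===== Notes on version B (the rewrite author's own statement) =====
-- stated objective: alternative
-- what changed: A is an iterative double loop filtering each friend-of-friend element inline into an accumulator set; B is a divide-and-conquer binary recursion over the friend list that, at each leaf, subtracts a once-precomputed exclusion set by one bulk set difference and merges halves by set union (no inner element loop, no accumulator).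
import Mathlib
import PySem

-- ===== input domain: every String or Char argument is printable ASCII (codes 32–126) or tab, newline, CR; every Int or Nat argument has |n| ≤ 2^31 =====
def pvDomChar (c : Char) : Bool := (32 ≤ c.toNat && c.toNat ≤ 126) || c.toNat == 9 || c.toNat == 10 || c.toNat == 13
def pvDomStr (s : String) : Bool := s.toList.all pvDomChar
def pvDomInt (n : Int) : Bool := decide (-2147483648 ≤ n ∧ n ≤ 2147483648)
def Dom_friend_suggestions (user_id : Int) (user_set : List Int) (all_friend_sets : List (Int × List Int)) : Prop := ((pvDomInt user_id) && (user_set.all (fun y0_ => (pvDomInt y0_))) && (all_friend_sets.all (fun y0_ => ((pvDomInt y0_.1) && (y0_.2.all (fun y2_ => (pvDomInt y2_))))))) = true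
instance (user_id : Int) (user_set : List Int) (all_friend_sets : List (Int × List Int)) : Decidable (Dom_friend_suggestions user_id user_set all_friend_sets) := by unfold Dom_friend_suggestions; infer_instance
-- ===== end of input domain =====

-- B replaces A's iterative double loop (inline per-element filter into an accumulator) by a
-- divide-and-conquer binary recursion with one bulk set-difference per leaf and unions to merge (alternative).


-- ===== PORT A =====
def friend_suggestions (user_id : Int) (user_set : List Int) (all_friend_sets : List (Int × List Int)) : List Int :=
  user_set.foldl
    (fun suggestions friend =>
      (((all_friend_sets.lookup friend).getD [])).foldl
        (fun sugg f =>
          if !(PySem.Set.contains user_set f) && f != user_id then PySem.Set.add sugg f else sugg)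
        suggestions)
    PySem.Set.empty

-- ===== PORT B =====
-- B's inner recursion 'rec(lo, hi)', ported on the slice friends[lo:hi] it works on: empty slice,
-- one-element slice (bulk difference of the looked-up friend set against the precomputed exclusion
-- set), or split in the middle and merge the halves by set union.
def fsRec (excluded : PySem.Set Int) (all_friend_sets : List (Int × List Int)) (l : List Int) : PySem.Set Int :=
  if _h0 : l.length = 0 then PySem.Set.empty
  else if _h1 : l.length = 1 then
    PySem.Set.diff (PySem.Set.ofList ((all_friend_sets.lookup l.headI).getD [])) excluded
  else
    PySem.Set.union
      (fsRec excluded all_friend_sets (l.take (l.length / 2)))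
      (fsRec excluded all_friend_sets (l.drop (l.length / 2)))
termination_by l.length
decreasing_by
  · simp only [List.length_take]; omega
  · simp only [List.length_drop]; omega

def friend_suggestions_alt (user_id : Int) (user_set : List Int) (all_friend_sets : List (Int × List Int)) : List Int :=
  let excluded : PySem.Set Int := PySem.Set.union (PySem.Set.ofList user_set) [user_id]
  fsRec excluded all_friend_sets user_set

-- ===== PRECONDITION & SPEC =====
def Spec_friend_suggestions (user_id : Int) (user_set : List Int) (all_friend_sets : List (Int × List Int)) (out : List Int) : Prop := out = friend_suggestions_alt user_id user_set all_friend_sets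
instance (user_id : Int) (user_set : List Int) (all_friend_sets : List (Int × List Int)) (out : List Int) : Decidable (Spec_friend_suggestions user_id user_set all_friend_sets out) := by unfold Spec_friend_suggestions; infer_instance

-- ===== CLAIM =====
def Claim_equal_friend_suggestions : Prop := ∀ (user_id : Int) (user_set : List Int) (all_friend_sets : List (Int × List Int)), Dom_friend_suggestions user_id user_set all_friend_sets → Spec_friend_suggestions user_id user_set all_friend_sets (friend_suggestions user_id user_set all_friend_sets)

-- ===== LEMMAS AND PROOFS =====

-- A's membership test equals non-membership in B's precomputed exclusion set.
theorem pv_pred_eq (u : List Int) (uid : Int) (f : Int) :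
    (!(PySem.Set.contains u f) && f != uid)
      = !(PySem.Set.contains (PySem.Set.union (PySem.Set.ofList u) [uid]) f) := by
  rw [Bool.eq_iff_iff]
  simp only [Bool.and_eq_true, Bool.not_eq_true', bne_iff_ne, PySem.Set.contains_eq_listContains,
    List.contains_eq_mem, decide_eq_false_iff_not]
  constructor
  · rintro ⟨h1, h2⟩ hmem
    rcases (PySem.Set.mem_union _ _ _).1 hmem with h | h
    · exact h1 ((PySem.Set.mem_ofList _ _).1 h)
    · simp at h; exact h2 h
  · intro h
    refine ⟨fun hm => h ((PySem.Set.mem_union _ _ _).2 (Or.inl ((PySem.Set.mem_ofList _ _).2 hm))), ?_⟩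
    intro he; exact h ((PySem.Set.mem_union _ _ _).2 (Or.inr (by simp [he])))

-- A's inner conditional-add loop equals a set update with the filtered list.
theorem pv_inner (p : Int → Bool) (L : List Int) (s : PySem.Set Int) :
    L.foldl (fun a f => if p f then PySem.Set.add a f else a) s
      = PySem.Set.update s (L.filter p) := by
  induction L generalizing s with
  | nil => rfl
  | cons h t ih =>
    by_cases hp : p h = true
    · simp only [List.foldl_cons, hp, if_true, List.filter_cons, PySem.Set.update_cons]
      exact ih (PySem.Set.add s h)
    · simp only [List.foldl_cons, hp, if_false, List.filter_cons, Bool.false_eq_true]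
      exact ih s

theorem pv_ofList_add (a : List Int) (h : Int) :
    PySem.Set.ofList (PySem.Set.add a h) = PySem.Set.add (PySem.Set.ofList a) h := by
  by_cases hm : h ∈ a
  · rw [PySem.Set.add_of_mem hm, PySem.Set.add_of_mem ((PySem.Set.mem_ofList _ _).2 hm)]
  · rw [PySem.Set.add_of_not_mem hm, PySem.Set.ofList_append_singleton]

theorem pv_ofList_update (a : List Int) (b : List Int) :
    PySem.Set.ofList (PySem.Set.update a b) = PySem.Set.update (PySem.Set.ofList a) b := by
  induction b generalizing a with
  | nil => rfl
  | cons h t ih =>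
    rw [PySem.Set.update_cons, ih (PySem.Set.add a h), pv_ofList_add, ← PySem.Set.update_cons]

-- updating with a concatenation = updating with the (already folded) update of the two.
theorem pv_update_assoc (s a b : List Int) :
    PySem.Set.update (PySem.Set.update s a) b = PySem.Set.update s (PySem.Set.update a b) := by
  have h1 : PySem.Set.update (PySem.Set.update s a) b = PySem.Set.update s (a ++ b) := by
    simp [PySem.Set.update, List.foldl_append]
  rw [h1, PySem.Set.update_eq_append_filter s (a ++ b),
      PySem.Set.update_eq_append_filter s (PySem.Set.update a b)]
  rw [PySem.Set.ofList_append, pv_ofList_update]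

-- filtering commutes with ofList (first-occurrence dedup).
theorem pv_ofList_filter (p : Int → Bool) (L : List Int) :
    PySem.Set.ofList (L.filter p) = (PySem.Set.ofList L).filter p := by
  induction L with
  | nil => rfl
  | cons h t ih =>
    rw [PySem.Set.ofList_cons]
    by_cases hp : p h = true
    · rw [List.filter_cons_of_pos hp, PySem.Set.ofList_cons, ih, List.filter_cons_of_pos hp]
      simp only [PySem.Set.discard, List.filter_filter]
      congr 1
      exact List.filter_congr fun x _ => Bool.and_comm _ _
    · rw [List.filter_cons_of_neg (by simp [hp]), ih, List.filter_cons_of_neg (by simp [hp])]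
      simp only [PySem.Set.discard, List.filter_filter]
      apply List.filter_congr
      intro x _
      by_cases hx : x = h
      · subst hx; simp [hp]
      · simp [hx]

-- updating with a filtered raw list = updating with the filtered deduplicated set.
theorem pv_update_filter (s : PySem.Set Int) (p : Int → Bool) (L : List Int) :
    PySem.Set.update s (L.filter p) = PySem.Set.update s ((PySem.Set.ofList L).filter p) := by
  rw [PySem.Set.update_eq_append_filter s (L.filter p),
      PySem.Set.update_eq_append_filter s ((PySem.Set.ofList L).filter p)]
  rw [pv_ofList_filter, pv_ofList_filter p (PySem.Set.ofList L), PySem.Set.ofList_ofList]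

-- B's recursion result holds distinct elements.
theorem pv_fsRec_nodup (excl : PySem.Set Int) (afs : List (Int × List Int)) (U : List Int) :
    (fsRec excl afs U).Nodup := by
  induction U using fsRec.induct with
  | case1 l h0 => rw [fsRec]; simp [h0]
  | case2 l h0 h1 =>
    rw [fsRec]
    simp only [dif_neg h0, dif_pos h1]
    exact PySem.Set.nodup_diff _ _ (PySem.Set.nodup_ofList _)
  | case3 l h0 h1 ih1 ih2 =>
    rw [fsRec]
    simp only [dif_neg h0, dif_neg h1]
    exact PySem.Set.nodup_union _ _ ih1

-- main correspondence: A's outer loop from any start set = union with B's recursion.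
theorem pv_main (excl : PySem.Set Int) (afs : List (Int × List Int)) (U : List Int) :
    ∀ (s : PySem.Set Int),
    U.foldl
      (fun sugg fr =>
        (((afs.lookup fr).getD [])).foldl
          (fun a f => if !(PySem.Set.contains excl f) then PySem.Set.add a f else a) sugg) s
      = PySem.Set.union s (fsRec excl afs U) := by
  induction U using fsRec.induct with
  | case1 l h0 =>
    intro s
    obtain rfl : l = [] := List.length_eq_zero_iff.1 h0
    rw [fsRec]; simp only [List.length_nil, dif_pos]
    rfl
  | case2 l h0 h1 =>
    intro s
    obtain ⟨x, rfl⟩ := List.length_eq_one_iff.1 h1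
    rw [fsRec]
    simp only [dif_neg h0, dif_pos h1, List.headI_cons, List.foldl_cons, List.foldl_nil]
    rw [pv_inner, pv_update_filter]
    rfl
  | case3 l h0 h1 ih1 ih2 =>
    intro s
    conv_lhs => rw [← List.take_append_drop (l.length / 2) l]
    rw [List.foldl_append, ih1, ih2]
    conv_rhs => rw [fsRec]
    simp only [dif_neg h0, dif_neg h1]
    show PySem.Set.update (PySem.Set.update s _) _ = PySem.Set.update s (PySem.Set.update _ _)
    exact pv_update_assoc _ _ _

-- ===== VERDICT =====
theorem friend_suggestions_spec : Claim_equal_friend_suggestions := by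
  intro user_id user_set all_friend_sets _
  unfold Spec_friend_suggestions friend_suggestions friend_suggestions_alt
  have hpred : (fun (sugg : PySem.Set Int) (fr : Int) =>
      (((all_friend_sets.lookup fr).getD [])).foldl
        (fun a f => if !(PySem.Set.contains user_set f) && f != user_id then PySem.Set.add a f else a) sugg)
      = (fun sugg fr =>
      (((all_friend_sets.lookup fr).getD [])).foldl
        (fun a f => if !(PySem.Set.contains (PySem.Set.union (PySem.Set.ofList user_set) [user_id]) f)
          then PySem.Set.add a f else a) sugg) := by
    funext sugg fr
    congr 1
    funext a f
    rw [pv_pred_eq]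
  rw [hpred]
  rw [show (PySem.Set.empty : PySem.Set Int) = [] from rfl,
      pv_main (PySem.Set.union (PySem.Set.ofList user_set) [user_id]) all_friend_sets user_set []]
  show PySem.Set.update [] _ = _
  rw [PySem.Set.update_nil_left, PySem.Set.ofList_eq_self_of_nodup _ (pv_fsRec_nodup _ _ _)]
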